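-- pv_equiv track=rewrite | github.com/KENAZCRUCIA/Python-mobile-money | Python-mobile-money/mobile money py/Mobile_Money.py | transfer_charges
-- ===== SOURCE A (Python) =====
-- def transfer_charges(amount):
--     charge_table = [
--          (1, 49, 0),
--          (50, 100, 0,),
--          (101, 500, 7),
--          (501, 1000, 13),
--          (1001, 1500, 23),
--          (1501, 2500, 33),
--          (2501, 3500, 53),
--          (3501, 5000, 57),
--          (5001, 7500, 78),
--          (7501, 10000, 90),
--          (10001, 15000, 100),
--          (15001, 20000, 105),
--          (20001, 35000, 108),
--          (35001, 50000, 108),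
--          (50001, 250000, 108)
--          ]
--     for minm, maxm, charge in charge_table:
--         if minm <= amount <= maxm:
--             return charge
--     return "N/A"
-- ===== SOURCE B (Python) =====
-- _UPPERS = [49, 100, 500, 1000, 1500, 2500, 3500, 5000, 7500, 10000,
--            15000, 20000, 35000, 50000, 250000]
-- _MINS = [1, 50, 101, 501, 1001, 1501, 2501, 3501, 5001, 7501,
--          10001, 15001, 20001, 35001, 50001]
-- _CHARGES = [0, 0, 7, 13, 23, 33, 53, 57, 78, 90, 100, 105, 108, 108, 108]
--
--
-- def _bisect_left(xs, x):
--     lo, hi = 0, len(xs)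
--     while lo < hi:
--         mid = (lo + hi) // 2
--         if xs[mid] < x:
--             lo = mid + 1
--         else:
--             hi = mid
--     return lo
--
--
-- def transfer_charges(amount):
--     i = _bisect_left(_UPPERS, amount)
--     if i < len(_UPPERS) and _MINS[i] <= amount <= _UPPERS[i]:
--         return _CHARGES[i]
--     return "N/A"
-- ===== Notes on version B (the rewrite author's own statement) =====
-- stated objective: alternative
-- what changed: Replaced the linear scan over the bracket table by a hand-written binary search (bisect_left) over a precomputed ascending upper-bounds list with parallel mins/charges lists, followed by one bracket membership check.
-- outside the precondition, e.g. on transfer_charges(300000): A returns 'N/A', B returns 'N/A'; on transfer_charges(0): A returns 'N/A', B returns 'N/A'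
import Mathlib
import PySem

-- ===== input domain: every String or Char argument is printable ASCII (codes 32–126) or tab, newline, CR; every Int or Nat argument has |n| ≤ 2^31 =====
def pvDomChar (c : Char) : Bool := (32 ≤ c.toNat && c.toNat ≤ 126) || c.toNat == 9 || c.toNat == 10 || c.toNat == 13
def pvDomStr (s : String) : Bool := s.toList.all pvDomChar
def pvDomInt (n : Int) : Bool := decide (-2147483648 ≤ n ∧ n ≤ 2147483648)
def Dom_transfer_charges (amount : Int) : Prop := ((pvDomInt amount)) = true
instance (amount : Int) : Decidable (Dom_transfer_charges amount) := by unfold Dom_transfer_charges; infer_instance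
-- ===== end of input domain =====

-- B replaces A's linear scan of the bracket table by a binary search over an
-- ascending upper-bounds list with parallel mins/charges lists (alternative
-- decomposition; the table is fixed-size, so no speed is claimed).


-- ===== PORT A =====
def chargeTableA : List (Int × Int × Int) :=
  [(1, 49, 0), (50, 100, 0), (101, 500, 7), (501, 1000, 13), (1001, 1500, 23),
   (1501, 2500, 33), (2501, 3500, 53), (3501, 5000, 57), (5001, 7500, 78),
   (7501, 10000, 90), (10001, 15000, 100), (15001, 20000, 105),
   (20001, 35000, 108), (35001, 50000, 108), (50001, 250000, 108)]

-- the for-loop with early return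
def lookupA : List (Int × Int × Int) → Int → Option Int
  | [], _ => none
  | (minm, maxm, charge) :: rest, amount =>
      if minm ≤ amount ∧ amount ≤ maxm then some charge else lookupA rest amount

def transfer_charges (amount : Int) : Int :=
  match lookupA chargeTableA amount with
  | some c => c
  | none => 0  -- Python returns the string "N/A" here; excluded by Pre_transfer_charges

-- ===== PORT B =====
def uppersB : List Int :=
  [49, 100, 500, 1000, 1500, 2500, 3500, 5000, 7500, 10000, 15000, 20000, 35000, 50000, 250000]
def minsB : List Int :=
  [1, 50, 101, 501, 1001, 1501, 2501, 3501, 5001, 7501, 10001, 15001, 20001, 35001, 50001]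
def chargesB : List Int :=
  [0, 0, 7, 13, 23, 33, 53, 57, 78, 90, 100, 105, 108, 108, 108]

-- Source B's _bisect_left while-loop; xs[mid] is always in range, ported as getD
def bisectLeftB (xs : List Int) (x : Int) (lo hi : Nat) : Nat :=
  if lo < hi then
    let mid := (lo + hi) / 2
    if xs.getD mid 0 < x then bisectLeftB xs x (mid + 1) hi
    else bisectLeftB xs x lo mid
  else lo
termination_by hi - lo
decreasing_by all_goals omega

def transfer_charges_alt (amount : Int) : Int :=
  let i := bisectLeftB uppersB amount 0 uppersB.length
  if i < uppersB.length ∧ minsB.getD i 0 ≤ amount ∧ amount ≤ uppersB.getD i 0 then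
    chargesB.getD i 0
  else 0  -- Python returns the string "N/A" here; excluded by Pre_transfer_charges

-- ===== PRECONDITION & SPEC =====
-- Pre_ excludes the amounts outside [1, 250000]: there A returns the string "N/A",
-- which is not a value of the declared Int return type.
def Pre_transfer_charges (amount : Int) : Prop := 1 ≤ amount ∧ amount ≤ 250000
instance (amount : Int) : Decidable (Pre_transfer_charges amount) := by
  unfold Pre_transfer_charges; infer_instance
def pvWitness_transfer_charges : Int := (100)
def Spec_transfer_charges (amount : Int) (out : Int) : Prop := out = transfer_charges_alt amount
instance (amount : Int) (out : Int) : Decidable (Spec_transfer_charges amount out) := by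
  unfold Spec_transfer_charges; infer_instance

-- ===== CLAIM (what is proved, stated in full; the proofs are below) =====
def Claim_equal_transfer_charges : Prop := ∀ (amount : Int), Dom_transfer_charges amount → Pre_transfer_charges amount → Spec_transfer_charges amount (transfer_charges amount)

-- ===== LEMMAS AND PROOFS =====
lemma evalB_0 (a : Int) (h1 : 1 ≤ a) (h2 : a ≤ 49) : transfer_charges_alt a = 0 := by
  unfold transfer_charges_alt
  rw [bisectLeftB]; norm_num [uppersB, List.getD]
  rw [if_neg (show ¬((5000:Int) < a) by omega)]
  rw [bisectLeftB]; norm_num [uppersB, List.getD]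
  rw [if_neg (show ¬((1000:Int) < a) by omega)]
  rw [bisectLeftB]; norm_num [uppersB, List.getD]
  rw [if_neg (show ¬((100:Int) < a) by omega)]
  rw [bisectLeftB]; norm_num [uppersB, List.getD]
  rw [if_neg (show ¬((49:Int) < a) by omega)]
  rw [bisectLeftB]; norm_num [uppersB, minsB, chargesB, List.getD]
lemma evalA_0 (a : Int) (h1 : 1 ≤ a) (h2 : a ≤ 49) : transfer_charges a = 0 := by
  unfold transfer_charges
  simp only [chargeTableA, lookupA]
  rw [if_pos (⟨by omega, by omega⟩ : (1:Int) ≤ a ∧ a ≤ 49)]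

lemma evalB_1 (a : Int) (h1 : 50 ≤ a) (h2 : a ≤ 100) : transfer_charges_alt a = 0 := by
  unfold transfer_charges_alt
  rw [bisectLeftB]; norm_num [uppersB, List.getD]
  rw [if_neg (show ¬((5000:Int) < a) by omega)]
  rw [bisectLeftB]; norm_num [uppersB, List.getD]
  rw [if_neg (show ¬((1000:Int) < a) by omega)]
  rw [bisectLeftB]; norm_num [uppersB, List.getD]
  rw [if_neg (show ¬((100:Int) < a) by omega)]
  rw [bisectLeftB]; norm_num [uppersB, List.getD]
  rw [if_pos (show (49:Int) < a by omega)]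
  rw [bisectLeftB]; norm_num [uppersB, minsB, chargesB, List.getD]
lemma evalA_1 (a : Int) (h1 : 50 ≤ a) (h2 : a ≤ 100) : transfer_charges a = 0 := by
  unfold transfer_charges
  simp only [chargeTableA, lookupA]
  rw [if_neg (show ¬((1:Int) ≤ a ∧ a ≤ 49) by omega)]
  rw [if_pos (⟨by omega, by omega⟩ : (50:Int) ≤ a ∧ a ≤ 100)]

lemma evalB_2 (a : Int) (h1 : 101 ≤ a) (h2 : a ≤ 500) : transfer_charges_alt a = 7 := by
  unfold transfer_charges_alt
  rw [bisectLeftB]; norm_num [uppersB, List.getD]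
  rw [if_neg (show ¬((5000:Int) < a) by omega)]
  rw [bisectLeftB]; norm_num [uppersB, List.getD]
  rw [if_neg (show ¬((1000:Int) < a) by omega)]
  rw [bisectLeftB]; norm_num [uppersB, List.getD]
  rw [if_pos (show (100:Int) < a by omega)]
  rw [bisectLeftB]; norm_num [uppersB, List.getD]
  rw [if_neg (show ¬((500:Int) < a) by omega)]
  rw [bisectLeftB]; norm_num [uppersB, minsB, chargesB, List.getD]
  all_goals omega
lemma evalA_2 (a : Int) (h1 : 101 ≤ a) (h2 : a ≤ 500) : transfer_charges a = 7 := by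
  unfold transfer_charges
  simp only [chargeTableA, lookupA]
  rw [if_neg (show ¬((1:Int) ≤ a ∧ a ≤ 49) by omega)]
  rw [if_neg (show ¬((50:Int) ≤ a ∧ a ≤ 100) by omega)]
  rw [if_pos (⟨by omega, by omega⟩ : (101:Int) ≤ a ∧ a ≤ 500)]

lemma evalB_3 (a : Int) (h1 : 501 ≤ a) (h2 : a ≤ 1000) : transfer_charges_alt a = 13 := by
  unfold transfer_charges_alt
  rw [bisectLeftB]; norm_num [uppersB, List.getD]
  rw [if_neg (show ¬((5000:Int) < a) by omega)]
  rw [bisectLeftB]; norm_num [uppersB, List.getD]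
  rw [if_neg (show ¬((1000:Int) < a) by omega)]
  rw [bisectLeftB]; norm_num [uppersB, List.getD]
  rw [if_pos (show (100:Int) < a by omega)]
  rw [bisectLeftB]; norm_num [uppersB, List.getD]
  rw [if_pos (show (500:Int) < a by omega)]
  rw [bisectLeftB]; norm_num [uppersB, minsB, chargesB, List.getD]
  all_goals omega
lemma evalA_3 (a : Int) (h1 : 501 ≤ a) (h2 : a ≤ 1000) : transfer_charges a = 13 := by
  unfold transfer_charges
  simp only [chargeTableA, lookupA]
  rw [if_neg (show ¬((1:Int) ≤ a ∧ a ≤ 49) by omega)]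
  rw [if_neg (show ¬((50:Int) ≤ a ∧ a ≤ 100) by omega)]
  rw [if_neg (show ¬((101:Int) ≤ a ∧ a ≤ 500) by omega)]
  rw [if_pos (⟨by omega, by omega⟩ : (501:Int) ≤ a ∧ a ≤ 1000)]

lemma evalB_4 (a : Int) (h1 : 1001 ≤ a) (h2 : a ≤ 1500) : transfer_charges_alt a = 23 := by
  unfold transfer_charges_alt
  rw [bisectLeftB]; norm_num [uppersB, List.getD]
  rw [if_neg (show ¬((5000:Int) < a) by omega)]
  rw [bisectLeftB]; norm_num [uppersB, List.getD]
  rw [if_pos (show (1000:Int) < a by omega)]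
  rw [bisectLeftB]; norm_num [uppersB, List.getD]
  rw [if_neg (show ¬((2500:Int) < a) by omega)]
  rw [bisectLeftB]; norm_num [uppersB, List.getD]
  rw [if_neg (show ¬((1500:Int) < a) by omega)]
  rw [bisectLeftB]; norm_num [uppersB, minsB, chargesB, List.getD]
  all_goals omega
lemma evalA_4 (a : Int) (h1 : 1001 ≤ a) (h2 : a ≤ 1500) : transfer_charges a = 23 := by
  unfold transfer_charges
  simp only [chargeTableA, lookupA]
  rw [if_neg (show ¬((1:Int) ≤ a ∧ a ≤ 49) by omega)]
  rw [if_neg (show ¬((50:Int) ≤ a ∧ a ≤ 100) by omega)]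
  rw [if_neg (show ¬((101:Int) ≤ a ∧ a ≤ 500) by omega)]
  rw [if_neg (show ¬((501:Int) ≤ a ∧ a ≤ 1000) by omega)]
  rw [if_pos (⟨by omega, by omega⟩ : (1001:Int) ≤ a ∧ a ≤ 1500)]

lemma evalB_5 (a : Int) (h1 : 1501 ≤ a) (h2 : a ≤ 2500) : transfer_charges_alt a = 33 := by
  unfold transfer_charges_alt
  rw [bisectLeftB]; norm_num [uppersB, List.getD]
  rw [if_neg (show ¬((5000:Int) < a) by omega)]
  rw [bisectLeftB]; norm_num [uppersB, List.getD]
  rw [if_pos (show (1000:Int) < a by omega)]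
  rw [bisectLeftB]; norm_num [uppersB, List.getD]
  rw [if_neg (show ¬((2500:Int) < a) by omega)]
  rw [bisectLeftB]; norm_num [uppersB, List.getD]
  rw [if_pos (show (1500:Int) < a by omega)]
  rw [bisectLeftB]; norm_num [uppersB, minsB, chargesB, List.getD]
  all_goals omega
lemma evalA_5 (a : Int) (h1 : 1501 ≤ a) (h2 : a ≤ 2500) : transfer_charges a = 33 := by
  unfold transfer_charges
  simp only [chargeTableA, lookupA]
  rw [if_neg (show ¬((1:Int) ≤ a ∧ a ≤ 49) by omega)]
  rw [if_neg (show ¬((50:Int) ≤ a ∧ a ≤ 100) by omega)]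
  rw [if_neg (show ¬((101:Int) ≤ a ∧ a ≤ 500) by omega)]
  rw [if_neg (show ¬((501:Int) ≤ a ∧ a ≤ 1000) by omega)]
  rw [if_neg (show ¬((1001:Int) ≤ a ∧ a ≤ 1500) by omega)]
  rw [if_pos (⟨by omega, by omega⟩ : (1501:Int) ≤ a ∧ a ≤ 2500)]

lemma evalB_6 (a : Int) (h1 : 2501 ≤ a) (h2 : a ≤ 3500) : transfer_charges_alt a = 53 := by
  unfold transfer_charges_alt
  rw [bisectLeftB]; norm_num [uppersB, List.getD]
  rw [if_neg (show ¬((5000:Int) < a) by omega)]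
  rw [bisectLeftB]; norm_num [uppersB, List.getD]
  rw [if_pos (show (1000:Int) < a by omega)]
  rw [bisectLeftB]; norm_num [uppersB, List.getD]
  rw [if_pos (show (2500:Int) < a by omega)]
  rw [bisectLeftB]; norm_num [uppersB, List.getD]
  rw [if_neg (show ¬((3500:Int) < a) by omega)]
  rw [bisectLeftB]; norm_num [uppersB, minsB, chargesB, List.getD]
  all_goals omega
lemma evalA_6 (a : Int) (h1 : 2501 ≤ a) (h2 : a ≤ 3500) : transfer_charges a = 53 := by
  unfold transfer_charges
  simp only [chargeTableA, lookupA]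
  rw [if_neg (show ¬((1:Int) ≤ a ∧ a ≤ 49) by omega)]
  rw [if_neg (show ¬((50:Int) ≤ a ∧ a ≤ 100) by omega)]
  rw [if_neg (show ¬((101:Int) ≤ a ∧ a ≤ 500) by omega)]
  rw [if_neg (show ¬((501:Int) ≤ a ∧ a ≤ 1000) by omega)]
  rw [if_neg (show ¬((1001:Int) ≤ a ∧ a ≤ 1500) by omega)]
  rw [if_neg (show ¬((1501:Int) ≤ a ∧ a ≤ 2500) by omega)]
  rw [if_pos (⟨by omega, by omega⟩ : (2501:Int) ≤ a ∧ a ≤ 3500)]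

lemma evalB_7 (a : Int) (h1 : 3501 ≤ a) (h2 : a ≤ 5000) : transfer_charges_alt a = 57 := by
  unfold transfer_charges_alt
  rw [bisectLeftB]; norm_num [uppersB, List.getD]
  rw [if_neg (show ¬((5000:Int) < a) by omega)]
  rw [bisectLeftB]; norm_num [uppersB, List.getD]
  rw [if_pos (show (1000:Int) < a by omega)]
  rw [bisectLeftB]; norm_num [uppersB, List.getD]
  rw [if_pos (show (2500:Int) < a by omega)]
  rw [bisectLeftB]; norm_num [uppersB, List.getD]
  rw [if_pos (show (3500:Int) < a by omega)]
  rw [bisectLeftB]; norm_num [uppersB, minsB, chargesB, List.getD]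
  all_goals omega
lemma evalA_7 (a : Int) (h1 : 3501 ≤ a) (h2 : a ≤ 5000) : transfer_charges a = 57 := by
  unfold transfer_charges
  simp only [chargeTableA, lookupA]
  rw [if_neg (show ¬((1:Int) ≤ a ∧ a ≤ 49) by omega)]
  rw [if_neg (show ¬((50:Int) ≤ a ∧ a ≤ 100) by omega)]
  rw [if_neg (show ¬((101:Int) ≤ a ∧ a ≤ 500) by omega)]
  rw [if_neg (show ¬((501:Int) ≤ a ∧ a ≤ 1000) by omega)]
  rw [if_neg (show ¬((1001:Int) ≤ a ∧ a ≤ 1500) by omega)]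
  rw [if_neg (show ¬((1501:Int) ≤ a ∧ a ≤ 2500) by omega)]
  rw [if_neg (show ¬((2501:Int) ≤ a ∧ a ≤ 3500) by omega)]
  rw [if_pos (⟨by omega, by omega⟩ : (3501:Int) ≤ a ∧ a ≤ 5000)]

lemma evalB_8 (a : Int) (h1 : 5001 ≤ a) (h2 : a ≤ 7500) : transfer_charges_alt a = 78 := by
  unfold transfer_charges_alt
  rw [bisectLeftB]; norm_num [uppersB, List.getD]
  rw [if_pos (show (5000:Int) < a by omega)]
  rw [bisectLeftB]; norm_num [uppersB, List.getD]
  rw [if_neg (show ¬((20000:Int) < a) by omega)]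
  rw [bisectLeftB]; norm_num [uppersB, List.getD]
  rw [if_neg (show ¬((10000:Int) < a) by omega)]
  rw [bisectLeftB]; norm_num [uppersB, List.getD]
  rw [if_neg (show ¬((7500:Int) < a) by omega)]
  rw [bisectLeftB]; norm_num [uppersB, minsB, chargesB, List.getD]
  all_goals omega
lemma evalA_8 (a : Int) (h1 : 5001 ≤ a) (h2 : a ≤ 7500) : transfer_charges a = 78 := by
  unfold transfer_charges
  simp only [chargeTableA, lookupA]
  rw [if_neg (show ¬((1:Int) ≤ a ∧ a ≤ 49) by omega)]
  rw [if_neg (show ¬((50:Int) ≤ a ∧ a ≤ 100) by omega)]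
  rw [if_neg (show ¬((101:Int) ≤ a ∧ a ≤ 500) by omega)]
  rw [if_neg (show ¬((501:Int) ≤ a ∧ a ≤ 1000) by omega)]
  rw [if_neg (show ¬((1001:Int) ≤ a ∧ a ≤ 1500) by omega)]
  rw [if_neg (show ¬((1501:Int) ≤ a ∧ a ≤ 2500) by omega)]
  rw [if_neg (show ¬((2501:Int) ≤ a ∧ a ≤ 3500) by omega)]
  rw [if_neg (show ¬((3501:Int) ≤ a ∧ a ≤ 5000) by omega)]
  rw [if_pos (⟨by omega, by omega⟩ : (5001:Int) ≤ a ∧ a ≤ 7500)]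

lemma evalB_9 (a : Int) (h1 : 7501 ≤ a) (h2 : a ≤ 10000) : transfer_charges_alt a = 90 := by
  unfold transfer_charges_alt
  rw [bisectLeftB]; norm_num [uppersB, List.getD]
  rw [if_pos (show (5000:Int) < a by omega)]
  rw [bisectLeftB]; norm_num [uppersB, List.getD]
  rw [if_neg (show ¬((20000:Int) < a) by omega)]
  rw [bisectLeftB]; norm_num [uppersB, List.getD]
  rw [if_neg (show ¬((10000:Int) < a) by omega)]
  rw [bisectLeftB]; norm_num [uppersB, List.getD]
  rw [if_pos (show (7500:Int) < a by omega)]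
  rw [bisectLeftB]; norm_num [uppersB, minsB, chargesB, List.getD]
  all_goals omega
lemma evalA_9 (a : Int) (h1 : 7501 ≤ a) (h2 : a ≤ 10000) : transfer_charges a = 90 := by
  unfold transfer_charges
  simp only [chargeTableA, lookupA]
  rw [if_neg (show ¬((1:Int) ≤ a ∧ a ≤ 49) by omega)]
  rw [if_neg (show ¬((50:Int) ≤ a ∧ a ≤ 100) by omega)]
  rw [if_neg (show ¬((101:Int) ≤ a ∧ a ≤ 500) by omega)]
  rw [if_neg (show ¬((501:Int) ≤ a ∧ a ≤ 1000) by omega)]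
  rw [if_neg (show ¬((1001:Int) ≤ a ∧ a ≤ 1500) by omega)]
  rw [if_neg (show ¬((1501:Int) ≤ a ∧ a ≤ 2500) by omega)]
  rw [if_neg (show ¬((2501:Int) ≤ a ∧ a ≤ 3500) by omega)]
  rw [if_neg (show ¬((3501:Int) ≤ a ∧ a ≤ 5000) by omega)]
  rw [if_neg (show ¬((5001:Int) ≤ a ∧ a ≤ 7500) by omega)]
  rw [if_pos (⟨by omega, by omega⟩ : (7501:Int) ≤ a ∧ a ≤ 10000)]

lemma evalB_10 (a : Int) (h1 : 10001 ≤ a) (h2 : a ≤ 15000) : transfer_charges_alt a = 100 := by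
  unfold transfer_charges_alt
  rw [bisectLeftB]; norm_num [uppersB, List.getD]
  rw [if_pos (show (5000:Int) < a by omega)]
  rw [bisectLeftB]; norm_num [uppersB, List.getD]
  rw [if_neg (show ¬((20000:Int) < a) by omega)]
  rw [bisectLeftB]; norm_num [uppersB, List.getD]
  rw [if_pos (show (10000:Int) < a by omega)]
  rw [bisectLeftB]; norm_num [uppersB, List.getD]
  rw [if_neg (show ¬((15000:Int) < a) by omega)]
  rw [bisectLeftB]; norm_num [uppersB, minsB, chargesB, List.getD]
  all_goals omega
lemma evalA_10 (a : Int) (h1 : 10001 ≤ a) (h2 : a ≤ 15000) : transfer_charges a = 100 := by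
  unfold transfer_charges
  simp only [chargeTableA, lookupA]
  rw [if_neg (show ¬((1:Int) ≤ a ∧ a ≤ 49) by omega)]
  rw [if_neg (show ¬((50:Int) ≤ a ∧ a ≤ 100) by omega)]
  rw [if_neg (show ¬((101:Int) ≤ a ∧ a ≤ 500) by omega)]
  rw [if_neg (show ¬((501:Int) ≤ a ∧ a ≤ 1000) by omega)]
  rw [if_neg (show ¬((1001:Int) ≤ a ∧ a ≤ 1500) by omega)]
  rw [if_neg (show ¬((1501:Int) ≤ a ∧ a ≤ 2500) by omega)]
  rw [if_neg (show ¬((2501:Int) ≤ a ∧ a ≤ 3500) by omega)]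
  rw [if_neg (show ¬((3501:Int) ≤ a ∧ a ≤ 5000) by omega)]
  rw [if_neg (show ¬((5001:Int) ≤ a ∧ a ≤ 7500) by omega)]
  rw [if_neg (show ¬((7501:Int) ≤ a ∧ a ≤ 10000) by omega)]
  rw [if_pos (⟨by omega, by omega⟩ : (10001:Int) ≤ a ∧ a ≤ 15000)]

lemma evalB_11 (a : Int) (h1 : 15001 ≤ a) (h2 : a ≤ 20000) : transfer_charges_alt a = 105 := by
  unfold transfer_charges_alt
  rw [bisectLeftB]; norm_num [uppersB, List.getD]
  rw [if_pos (show (5000:Int) < a by omega)]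
  rw [bisectLeftB]; norm_num [uppersB, List.getD]
  rw [if_neg (show ¬((20000:Int) < a) by omega)]
  rw [bisectLeftB]; norm_num [uppersB, List.getD]
  rw [if_pos (show (10000:Int) < a by omega)]
  rw [bisectLeftB]; norm_num [uppersB, List.getD]
  rw [if_pos (show (15000:Int) < a by omega)]
  rw [bisectLeftB]; norm_num [uppersB, minsB, chargesB, List.getD]
  all_goals omega
lemma evalA_11 (a : Int) (h1 : 15001 ≤ a) (h2 : a ≤ 20000) : transfer_charges a = 105 := by
  unfold transfer_charges
  simp only [chargeTableA, lookupA]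
  rw [if_neg (show ¬((1:Int) ≤ a ∧ a ≤ 49) by omega)]
  rw [if_neg (show ¬((50:Int) ≤ a ∧ a ≤ 100) by omega)]
  rw [if_neg (show ¬((101:Int) ≤ a ∧ a ≤ 500) by omega)]
  rw [if_neg (show ¬((501:Int) ≤ a ∧ a ≤ 1000) by omega)]
  rw [if_neg (show ¬((1001:Int) ≤ a ∧ a ≤ 1500) by omega)]
  rw [if_neg (show ¬((1501:Int) ≤ a ∧ a ≤ 2500) by omega)]
  rw [if_neg (show ¬((2501:Int) ≤ a ∧ a ≤ 3500) by omega)]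
  rw [if_neg (show ¬((3501:Int) ≤ a ∧ a ≤ 5000) by omega)]
  rw [if_neg (show ¬((5001:Int) ≤ a ∧ a ≤ 7500) by omega)]
  rw [if_neg (show ¬((7501:Int) ≤ a ∧ a ≤ 10000) by omega)]
  rw [if_neg (show ¬((10001:Int) ≤ a ∧ a ≤ 15000) by omega)]
  rw [if_pos (⟨by omega, by omega⟩ : (15001:Int) ≤ a ∧ a ≤ 20000)]

lemma evalB_12 (a : Int) (h1 : 20001 ≤ a) (h2 : a ≤ 35000) : transfer_charges_alt a = 108 := by
  unfold transfer_charges_alt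
  rw [bisectLeftB]; norm_num [uppersB, List.getD]
  rw [if_pos (show (5000:Int) < a by omega)]
  rw [bisectLeftB]; norm_num [uppersB, List.getD]
  rw [if_pos (show (20000:Int) < a by omega)]
  rw [bisectLeftB]; norm_num [uppersB, List.getD]
  rw [if_neg (show ¬((50000:Int) < a) by omega)]
  rw [bisectLeftB]; norm_num [uppersB, List.getD]
  rw [if_neg (show ¬((35000:Int) < a) by omega)]
  rw [bisectLeftB]; norm_num [uppersB, minsB, chargesB, List.getD]
  all_goals omega
lemma evalA_12 (a : Int) (h1 : 20001 ≤ a) (h2 : a ≤ 35000) : transfer_charges a = 108 := by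
  unfold transfer_charges
  simp only [chargeTableA, lookupA]
  rw [if_neg (show ¬((1:Int) ≤ a ∧ a ≤ 49) by omega)]
  rw [if_neg (show ¬((50:Int) ≤ a ∧ a ≤ 100) by omega)]
  rw [if_neg (show ¬((101:Int) ≤ a ∧ a ≤ 500) by omega)]
  rw [if_neg (show ¬((501:Int) ≤ a ∧ a ≤ 1000) by omega)]
  rw [if_neg (show ¬((1001:Int) ≤ a ∧ a ≤ 1500) by omega)]
  rw [if_neg (show ¬((1501:Int) ≤ a ∧ a ≤ 2500) by omega)]
  rw [if_neg (show ¬((2501:Int) ≤ a ∧ a ≤ 3500) by omega)]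
  rw [if_neg (show ¬((3501:Int) ≤ a ∧ a ≤ 5000) by omega)]
  rw [if_neg (show ¬((5001:Int) ≤ a ∧ a ≤ 7500) by omega)]
  rw [if_neg (show ¬((7501:Int) ≤ a ∧ a ≤ 10000) by omega)]
  rw [if_neg (show ¬((10001:Int) ≤ a ∧ a ≤ 15000) by omega)]
  rw [if_neg (show ¬((15001:Int) ≤ a ∧ a ≤ 20000) by omega)]
  rw [if_pos (⟨by omega, by omega⟩ : (20001:Int) ≤ a ∧ a ≤ 35000)]

lemma evalB_13 (a : Int) (h1 : 35001 ≤ a) (h2 : a ≤ 50000) : transfer_charges_alt a = 108 := by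
  unfold transfer_charges_alt
  rw [bisectLeftB]; norm_num [uppersB, List.getD]
  rw [if_pos (show (5000:Int) < a by omega)]
  rw [bisectLeftB]; norm_num [uppersB, List.getD]
  rw [if_pos (show (20000:Int) < a by omega)]
  rw [bisectLeftB]; norm_num [uppersB, List.getD]
  rw [if_neg (show ¬((50000:Int) < a) by omega)]
  rw [bisectLeftB]; norm_num [uppersB, List.getD]
  rw [if_pos (show (35000:Int) < a by omega)]
  rw [bisectLeftB]; norm_num [uppersB, minsB, chargesB, List.getD]
  all_goals omega
lemma evalA_13 (a : Int) (h1 : 35001 ≤ a) (h2 : a ≤ 50000) : transfer_charges a = 108 := by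
  unfold transfer_charges
  simp only [chargeTableA, lookupA]
  rw [if_neg (show ¬((1:Int) ≤ a ∧ a ≤ 49) by omega)]
  rw [if_neg (show ¬((50:Int) ≤ a ∧ a ≤ 100) by omega)]
  rw [if_neg (show ¬((101:Int) ≤ a ∧ a ≤ 500) by omega)]
  rw [if_neg (show ¬((501:Int) ≤ a ∧ a ≤ 1000) by omega)]
  rw [if_neg (show ¬((1001:Int) ≤ a ∧ a ≤ 1500) by omega)]
  rw [if_neg (show ¬((1501:Int) ≤ a ∧ a ≤ 2500) by omega)]
  rw [if_neg (show ¬((2501:Int) ≤ a ∧ a ≤ 3500) by omega)]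
  rw [if_neg (show ¬((3501:Int) ≤ a ∧ a ≤ 5000) by omega)]
  rw [if_neg (show ¬((5001:Int) ≤ a ∧ a ≤ 7500) by omega)]
  rw [if_neg (show ¬((7501:Int) ≤ a ∧ a ≤ 10000) by omega)]
  rw [if_neg (show ¬((10001:Int) ≤ a ∧ a ≤ 15000) by omega)]
  rw [if_neg (show ¬((15001:Int) ≤ a ∧ a ≤ 20000) by omega)]
  rw [if_neg (show ¬((20001:Int) ≤ a ∧ a ≤ 35000) by omega)]
  rw [if_pos (⟨by omega, by omega⟩ : (35001:Int) ≤ a ∧ a ≤ 50000)]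

lemma evalB_14 (a : Int) (h1 : 50001 ≤ a) (h2 : a ≤ 250000) : transfer_charges_alt a = 108 := by
  unfold transfer_charges_alt
  rw [bisectLeftB]; norm_num [uppersB, List.getD]
  rw [if_pos (show (5000:Int) < a by omega)]
  rw [bisectLeftB]; norm_num [uppersB, List.getD]
  rw [if_pos (show (20000:Int) < a by omega)]
  rw [bisectLeftB]; norm_num [uppersB, List.getD]
  rw [if_pos (show (50000:Int) < a by omega)]
  rw [bisectLeftB]; norm_num [uppersB, List.getD]
  rw [if_neg (show ¬((250000:Int) < a) by omega)]
  rw [bisectLeftB]; norm_num [uppersB, minsB, chargesB, List.getD]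
  all_goals omega
lemma evalA_14 (a : Int) (h1 : 50001 ≤ a) (h2 : a ≤ 250000) : transfer_charges a = 108 := by
  unfold transfer_charges
  simp only [chargeTableA, lookupA]
  rw [if_neg (show ¬((1:Int) ≤ a ∧ a ≤ 49) by omega)]
  rw [if_neg (show ¬((50:Int) ≤ a ∧ a ≤ 100) by omega)]
  rw [if_neg (show ¬((101:Int) ≤ a ∧ a ≤ 500) by omega)]
  rw [if_neg (show ¬((501:Int) ≤ a ∧ a ≤ 1000) by omega)]
  rw [if_neg (show ¬((1001:Int) ≤ a ∧ a ≤ 1500) by omega)]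
  rw [if_neg (show ¬((1501:Int) ≤ a ∧ a ≤ 2500) by omega)]
  rw [if_neg (show ¬((2501:Int) ≤ a ∧ a ≤ 3500) by omega)]
  rw [if_neg (show ¬((3501:Int) ≤ a ∧ a ≤ 5000) by omega)]
  rw [if_neg (show ¬((5001:Int) ≤ a ∧ a ≤ 7500) by omega)]
  rw [if_neg (show ¬((7501:Int) ≤ a ∧ a ≤ 10000) by omega)]
  rw [if_neg (show ¬((10001:Int) ≤ a ∧ a ≤ 15000) by omega)]
  rw [if_neg (show ¬((15001:Int) ≤ a ∧ a ≤ 20000) by omega)]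
  rw [if_neg (show ¬((20001:Int) ≤ a ∧ a ≤ 35000) by omega)]
  rw [if_neg (show ¬((35001:Int) ≤ a ∧ a ≤ 50000) by omega)]
  rw [if_pos (⟨by omega, by omega⟩ : (50001:Int) ≤ a ∧ a ≤ 250000)]

-- ===== VERDICT (by name: the statement is the Claim_ definition above) =====
theorem transfer_charges_spec : Claim_equal_transfer_charges := by
  intro a _ hpre
  obtain ⟨h1, h2⟩ := hpre
  unfold Spec_transfer_charges
  by_cases c0 : a ≤ 49
  · rw [evalA_0 a (by omega) c0, evalB_0 a (by omega) c0]
  by_cases c1 : a ≤ 100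
  · rw [evalA_1 a (by omega) c1, evalB_1 a (by omega) c1]
  by_cases c2 : a ≤ 500
  · rw [evalA_2 a (by omega) c2, evalB_2 a (by omega) c2]
  by_cases c3 : a ≤ 1000
  · rw [evalA_3 a (by omega) c3, evalB_3 a (by omega) c3]
  by_cases c4 : a ≤ 1500
  · rw [evalA_4 a (by omega) c4, evalB_4 a (by omega) c4]
  by_cases c5 : a ≤ 2500
  · rw [evalA_5 a (by omega) c5, evalB_5 a (by omega) c5]
  by_cases c6 : a ≤ 3500
  · rw [evalA_6 a (by omega) c6, evalB_6 a (by omega) c6]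
  by_cases c7 : a ≤ 5000
  · rw [evalA_7 a (by omega) c7, evalB_7 a (by omega) c7]
  by_cases c8 : a ≤ 7500
  · rw [evalA_8 a (by omega) c8, evalB_8 a (by omega) c8]
  by_cases c9 : a ≤ 10000
  · rw [evalA_9 a (by omega) c9, evalB_9 a (by omega) c9]
  by_cases c10 : a ≤ 15000
  · rw [evalA_10 a (by omega) c10, evalB_10 a (by omega) c10]
  by_cases c11 : a ≤ 20000
  · rw [evalA_11 a (by omega) c11, evalB_11 a (by omega) c11]
  by_cases c12 : a ≤ 35000
  · rw [evalA_12 a (by omega) c12, evalB_12 a (by omega) c12]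
  by_cases c13 : a ≤ 50000
  · rw [evalA_13 a (by omega) c13, evalB_13 a (by omega) c13]
  by_cases c14 : a ≤ 250000
  · rw [evalA_14 a (by omega) c14, evalB_14 a (by omega) c14]
  omega
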